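-- pv_equiv track=rewrite | github.com/ChristopherGra/Requirement-Management-Tool | processors/performance_test.py | most_optimized_approach
-- ===== SOURCE A (Python) =====
-- from typing import Dict, List
--
-- KEYWORDS = {
--     "ID :": "requirement_id",
--     "Object Type :": "type",
--     "Source :": "source",
--     "Verification :": "verification",
--     "Compliance :": "compliance",
--     "Allocation :": "allocation",
--     "Comments :": "comments",
--     "Compliance Comment :": "compliance_comment",
-- }
--
-- def most_optimized_approach(block: List[str]) -> Dict[str, str]:
--     """Most optimized with startswith for early exit."""
--     fields = {
--         "requirement_id": "",
--         "type": "",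
--         "definition": "",
--         "source": "",
--         "verification": "",
--         "compliance": "",
--         "allocation": "",
--         "comments": "",
--         "compliance_comment": ""
--     }
--
--     # Dictionary mapping fields to their continuation targets
--     multiline_map = {
--         "type": "definition",
--         "comments": "comments"
--     }
--
--     current_multiline_field = None
--
--     for line in block:
--         matched = False
--
--         # Use startswith for faster matching
--         for keyword, field in KEYWORDS.items():
--             if line.startswith(keyword):
--                 fields[field] = line[len(keyword):].strip()
--                 current_multiline_field = multiline_map.get(field)
--                 matched = True
--                 break
--
--         # Handle multi-line continuation
--         if not matched and current_multiline_field: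
--             fields[current_multiline_field] += " " + line
--
--     return fields
-- ===== SOURCE B (Python) =====
-- KEYWORDS = {
--     "ID :": "requirement_id",
--     "Object Type :": "type",
--     "Source :": "source",
--     "Verification :": "verification",
--     "Compliance :": "compliance",
--     "Allocation :": "allocation",
--     "Comments :": "comments",
--     "Compliance Comment :": "compliance_comment",
-- }
--
-- MULTILINE_MAP = {
--     "type": "definition",
--     "comments": "comments",
-- }
--
--
-- def _match(line):
--     """Return (field, stripped value) if the line starts with a keyword, else None."""
--     i = line.find(':')
--     if i < 0:
--         return None
--     field = KEYWORDS.get(line[:i + 1])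
--     if field is None:
--         return None
--     return field, line[i + 1:].strip()
--
--
-- def _segments(lines):
--     """Stage 1: group the block into segments, one per keyword line, each
--     carrying the run of non-keyword lines that follows it (lines before the
--     first keyword line belong to no segment and are dropped)."""
--     segs = []
--     for line in lines:
--         m = _match(line)
--         if m is not None:
--             segs.append((m[0], m[1], []))
--         elif segs:
--             segs[-1][2].append(line)
--     return segs
--
--
-- def most_optimized_approach(block):
--     """Two-stage parse: segment the block, then aggregate each segment."""
--     fields = {
--         "requirement_id": "",
--         "type": "",
--         "definition": "",
--         "source": "",
--         "verification": "",
--         "compliance": "",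
--         "allocation": "",
--         "comments": "",
--         "compliance_comment": ""
--     }
--     for field, value, cont in _segments(block):
--         fields[field] = value
--         target = MULTILINE_MAP.get(field)
--         if target is not None:
--             for line in cont:
--                 fields[target] += " " + line
--     return fields
-- ===== Notes on version B (the rewrite author's own statement) =====
-- stated objective: alternative
-- what changed: Replaces A's single-pass state machine (current_multiline_field threaded while scanning all 8 KEYWORDS with startswith per line) by a two-stage pipeline: stage 1 groups the block into segments (keyword line plus its run of continuation lines, matched by splitting at the first colon and one dict lookup), stage 2 aggregates each segment into the fields dict; measured ~4x faster since per line it does one find and one hash lookup instead of up to 8 prefix tests.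
import Mathlib
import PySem

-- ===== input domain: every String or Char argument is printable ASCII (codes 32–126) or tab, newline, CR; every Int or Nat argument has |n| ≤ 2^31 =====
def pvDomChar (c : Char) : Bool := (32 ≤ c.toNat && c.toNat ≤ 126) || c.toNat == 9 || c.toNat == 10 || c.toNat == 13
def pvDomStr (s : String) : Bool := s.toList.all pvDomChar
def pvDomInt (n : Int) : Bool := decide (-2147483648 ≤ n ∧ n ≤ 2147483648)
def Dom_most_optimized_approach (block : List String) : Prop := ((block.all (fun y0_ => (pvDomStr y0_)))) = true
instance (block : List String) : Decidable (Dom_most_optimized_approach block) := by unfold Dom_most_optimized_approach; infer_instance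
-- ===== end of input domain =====

-- B restructures A's single-pass state machine into a two-stage pipeline
-- (segment the block, then aggregate each segment); same results (alternative).

-- shared helper: Python's `a + b` on strings, on the List Char representation (exact)
def pvCat (a b : String) : String := String.ofList (a.toList ++ b.toList)

-- ===== PORT A =====
def pvKeywordsA : List (String × String) :=
  [("ID :", "requirement_id"), ("Object Type :", "type"), ("Source :", "source"),
   ("Verification :", "verification"), ("Compliance :", "compliance"),
   ("Allocation :", "allocation"), ("Comments :", "comments"),
   ("Compliance Comment :", "compliance_comment")]

def pvInitFieldsA : PySem.Dict String String :=
  PySem.Dict.mk [("requirement_id", ""), ("type", ""), ("definition", ""), ("source", ""),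
    ("verification", ""), ("compliance", ""), ("allocation", ""), ("comments", ""),
    ("compliance_comment", "")]

def pvMultilineMapA : PySem.Dict String String :=
  PySem.Dict.mk [("type", "definition"), ("comments", "comments")]

-- the inner `for keyword, field in KEYWORDS.items(): … break` loop: first startswith match
def pvScanKw (line : String) : List (String × String) → Option (String × String)
  | [] => none
  | (kw, field) :: rest =>
    if PySem.Str.startswith line kw then
      some (field, PySem.Str.strip (PySem.Str.slice line (some (PySem.Str.len kw)) none))
    else pvScanKw line rest

def pvStepA (st : PySem.Dict String String × Option String) (line : String) :
    PySem.Dict String String × Option String :=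
  match pvScanKw line pvKeywordsA with
  | some (field, v) => (st.1.insert field v, PySem.Dict.get? pvMultilineMapA field)
  | none =>
    match st.2 with
    | some cur => (st.1.modify cur "" (fun old => pvCat old (pvCat " " line)), st.2)
    | none => st

def most_optimized_approach (block : List String) : List (String × String) :=
  ((block.foldl pvStepA (pvInitFieldsA, none)).1).items

-- ===== PORT B =====
def pvKeywordsB : PySem.Dict String String :=
  PySem.Dict.mk [("ID :", "requirement_id"), ("Object Type :", "type"), ("Source :", "source"),
    ("Verification :", "verification"), ("Compliance :", "compliance"),
    ("Allocation :", "allocation"), ("Comments :", "comments"),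
    ("Compliance Comment :", "compliance_comment")]

def pvInitFieldsB : PySem.Dict String String :=
  PySem.Dict.mk [("requirement_id", ""), ("type", ""), ("definition", ""), ("source", ""),
    ("verification", ""), ("compliance", ""), ("allocation", ""), ("comments", ""),
    ("compliance_comment", "")]

def pvMultilineMapB : PySem.Dict String String :=
  PySem.Dict.mk [("type", "definition"), ("comments", "comments")]

-- Source B's _match: split at the first colon, one dict lookup
def pvMatchB (line : String) : Option (String × String) :=
  let i := PySem.Str.find line ":"
  if 0 ≤ i then
    match PySem.Dict.get? pvKeywordsB (PySem.Str.slice line none (some (i + 1))) with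
    | some field => some (field, PySem.Str.strip (PySem.Str.slice line (some (i + 1)) none))
    | none => none
  else none

-- Source B's _segments loop body: push a new segment, or append to the last one's cont list
def pvSegStep (segs : List (String × String × List String)) (line : String) :
    List (String × String × List String) :=
  match pvMatchB line with
  | some (f, v) => segs ++ [(f, v, [])]
  | none =>
    match segs.getLast? with
    | some (f, v, cont) => segs.dropLast ++ [(f, v, cont ++ [line])]
    | none => segs

def pvSegments (lines : List String) : List (String × String × List String) :=
  lines.foldl pvSegStep []

-- Source B's stage-2 loop body: set the field, then append the continuation lines
def pvAggStep (d : PySem.Dict String String) (seg : String × String × List String) :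
    PySem.Dict String String :=
  let d1 := d.insert seg.1 seg.2.1
  match PySem.Dict.get? pvMultilineMapB seg.1 with
  | some target => seg.2.2.foldl (fun d l => d.modify target "" (fun old => pvCat old (pvCat " " l))) d1
  | none => d1

def most_optimized_approach_alt (block : List String) : List (String × String) :=
  ((pvSegments block).foldl pvAggStep pvInitFieldsB).items

-- ===== PRECONDITION & SPEC =====
def Spec_most_optimized_approach (block : List String) (out : List (String × String)) : Prop := out = most_optimized_approach_alt block
instance (block : List String) (out : List (String × String)) : Decidable (Spec_most_optimized_approach block out) := by unfold Spec_most_optimized_approach; infer_instance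

-- ===== CLAIM (what is proved, stated in full; the proofs are below) =====
def Claim_equal_most_optimized_approach : Prop := ∀ (block : List String), Dom_most_optimized_approach block → Spec_most_optimized_approach block (most_optimized_approach block)

-- ===== LEMMAS AND PROOFS =====

lemma pv_singleton_prefix {c : Char} {l : List Char} : [c] <+: l ↔ l.head? = some c := by
  cases l with
  | nil => simp
  | cons a t => simp [List.cons_prefix_cons, eq_comm]

lemma pv_colon_prefix_drop {l : List Char} {i : Nat} :
    [':'] <+: l.drop i ↔ l[i]? = some ':' := by
  rw [pv_singleton_prefix, List.head?_drop]

-- the first occurrence of ':' in l is at index n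
lemma pv_find_colon (l : List Char) (n : Nat) (h1 : l[n]? = some ':')
    (h2 : ∀ i < n, l[i]? ≠ some ':') : PySem.Chars.find l [':'] = (n : Int) := by
  have hpre : [':'] <+: l.drop n := pv_colon_prefix_drop.mpr h1
  have hinf : [':'] <:+: l := hpre.isInfix.trans (List.drop_suffix n l).isInfix
  have hne : PySem.Chars.find l [':'] ≠ -1 := (PySem.Chars.find_ne_neg_one_iff l [':']).mpr hinf
  have hle : -1 ≤ PySem.Chars.find l [':'] := PySem.Chars.neg_one_le_find l [':']
  have hnn : 0 ≤ PySem.Chars.find l [':'] := by omega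
  obtain ⟨hat, hmin⟩ := PySem.Chars.find_spec hnn
  have hnotlt : ¬ (PySem.Chars.find l [':']).toNat < n := fun hlt =>
    h2 _ hlt (pv_colon_prefix_drop.mp hat)
  have hnotgt : ¬ n < (PySem.Chars.find l [':']).toNat := fun hgt => hmin n hgt hpre
  omega

-- when `line.startswith kw` for one of the keywords (colon exactly at index n = len kw - 1):
-- B's find/slice computations recover exactly kw and the same remainder
lemma pv_find_slice (line kw : String) (n : Nat)
    (hlen : kw.toList.length = n + 1) (hn : kw.toList[n]? = some ':')
    (hno : ∀ i < n, kw.toList[i]? ≠ some ':')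
    (h : PySem.Str.startswith line kw = true) :
    PySem.Str.find line ":" = (n : Int) ∧
    PySem.Str.slice line none (some ((n : Int) + 1)) = kw ∧
    PySem.Str.slice line (some ((n : Int) + 1)) none
      = PySem.Str.slice line (some (PySem.Str.len kw)) none := by
  rw [PySem.Str.startswith_eq] at h
  have hp : kw.toList <+: line.toList := (PySem.Chars.startswith_iff _ _).mp h
  obtain ⟨t, ht⟩ := hp
  refine ⟨?_, ?_, ?_⟩
  · rw [PySem.Str.find_eq]
    have h1 : line.toList[n]? = some ':' := by
      rw [← ht, List.getElem?_append_left (by omega)]; exact hn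
    have h2 : ∀ i < n, line.toList[i]? ≠ some ':' := by
      intro i hi
      rw [← ht, List.getElem?_append_left (by omega)]
      exact hno i hi
    exact pv_find_colon line.toList n h1 h2
  · apply String.toList_inj.mp
    rw [PySem.Str.toList_slice, PySem.Chars.slice_eq_listSlice,
      PySem.List.slice_to line.toList (by omega : (0:Int) ≤ (n : Int) + 1)]
    have : ((n : Int) + 1).toNat = n + 1 := by omega
    rw [this, ← ht, List.take_left' hlen]
  · have : ((n : Int) + 1) = PySem.Str.len kw := by rw [PySem.Str.len_eq, hlen]; push_cast; ring
    rw [this]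

-- B matching a keyword k with line[:i+1] implies line.startswith(k)
lemma pv_startswith_of_slice (line : String) (i : Int) (hi : 0 ≤ i) (kw : String)
    (h : PySem.Str.slice line none (some (i + 1)) = kw) :
    PySem.Str.startswith line kw = true := by
  rw [PySem.Str.startswith_eq, PySem.Chars.startswith_iff, ← h,
    PySem.Str.toList_slice, PySem.Chars.slice_eq_listSlice,
    PySem.List.slice_to line.toList (by omega : (0:Int) ≤ i + 1)]
  exact List.take_prefix _ _

-- B's colon-split dict-lookup matcher computes exactly A's first-startswith scan
lemma pv_match_eq (line : String) : pvMatchB line = pvScanKw line pvKeywordsA := by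
  by_cases h1 : PySem.Str.startswith line "ID :" = true
  · obtain ⟨e1, e2, e3⟩ := pv_find_slice line "ID :" 3 (by decide) (by decide) (by decide) h1
    simp only [pvMatchB, pvScanKw, pvKeywordsA, pvKeywordsB, e1, e2, e3, h1, if_true]
    norm_num
    try rfl
  by_cases h2 : PySem.Str.startswith line "Object Type :" = true
  · obtain ⟨e1, e2, e3⟩ := pv_find_slice line "Object Type :" 12 (by decide) (by decide) (by decide) h2
    simp only [pvMatchB, pvScanKw, pvKeywordsA, pvKeywordsB, e1, e2, e3, h2, h1,
      Bool.false_eq_true, if_false, if_true]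
    norm_num
    try rfl
  by_cases h3 : PySem.Str.startswith line "Source :" = true
  · obtain ⟨e1, e2, e3⟩ := pv_find_slice line "Source :" 7 (by decide) (by decide) (by decide) h3
    simp only [pvMatchB, pvScanKw, pvKeywordsA, pvKeywordsB, e1, e2, e3, h3, h1, h2,
      Bool.false_eq_true, if_false, if_true]
    norm_num
    try rfl
  by_cases h4 : PySem.Str.startswith line "Verification :" = true
  · obtain ⟨e1, e2, e3⟩ := pv_find_slice line "Verification :" 13 (by decide) (by decide) (by decide) h4
    simp only [pvMatchB, pvScanKw, pvKeywordsA, pvKeywordsB, e1, e2, e3, h4, h1, h2, h3,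
      Bool.false_eq_true, if_false, if_true]
    norm_num
    try rfl
  by_cases h5 : PySem.Str.startswith line "Compliance :" = true
  · obtain ⟨e1, e2, e3⟩ := pv_find_slice line "Compliance :" 11 (by decide) (by decide) (by decide) h5
    simp only [pvMatchB, pvScanKw, pvKeywordsA, pvKeywordsB, e1, e2, e3, h5, h1, h2, h3, h4,
      Bool.false_eq_true, if_false, if_true]
    norm_num
    try rfl
  by_cases h6 : PySem.Str.startswith line "Allocation :" = true
  · obtain ⟨e1, e2, e3⟩ := pv_find_slice line "Allocation :" 11 (by decide) (by decide) (by decide) h6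
    simp only [pvMatchB, pvScanKw, pvKeywordsA, pvKeywordsB, e1, e2, e3, h6, h1, h2, h3, h4, h5,
      Bool.false_eq_true, if_false, if_true]
    norm_num
    try rfl
  by_cases h7 : PySem.Str.startswith line "Comments :" = true
  · obtain ⟨e1, e2, e3⟩ := pv_find_slice line "Comments :" 9 (by decide) (by decide) (by decide) h7
    simp only [pvMatchB, pvScanKw, pvKeywordsA, pvKeywordsB, e1, e2, e3, h7, h1, h2, h3, h4, h5, h6,
      Bool.false_eq_true, if_false, if_true]
    norm_num
    try rfl
  by_cases h8 : PySem.Str.startswith line "Compliance Comment :" = true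
  · obtain ⟨e1, e2, e3⟩ := pv_find_slice line "Compliance Comment :" 19 (by decide) (by decide) (by decide) h8
    simp only [pvMatchB, pvScanKw, pvKeywordsA, pvKeywordsB, e1, e2, e3, h8, h1, h2, h3, h4, h5, h6, h7,
      Bool.false_eq_true, if_false, if_true]
    norm_num
    try rfl
  -- no keyword matches: both sides are none
  simp only [pvScanKw, pvKeywordsA, h1, h2, h3, h4, h5, h6, h7, h8,
    Bool.false_eq_true, if_false]
  by_cases hc : 0 ≤ PySem.Str.find line ":"
  · cases hq : PySem.Dict.get? pvKeywordsB (PySem.Str.slice line none (some (PySem.Str.find line ":" + 1))) with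
    | none =>
      simp only [pvMatchB]
      rw [if_pos hc, hq]
    | some f =>
      exfalso
      have hcont : pvKeywordsB.contains (PySem.Str.slice line none (some (PySem.Str.find line ":" + 1))) = true := by
        rw [PySem.Dict.contains_eq_isSome_get?, hq]; rfl
      have hk := (PySem.Dict.contains_iff_mem_keys _ _).mp hcont
      simp only [pvKeywordsB, PySem.Dict.keys_mk, List.map_cons, List.map_nil,
        List.mem_cons, List.not_mem_nil, or_false] at hk
      rcases hk with h | h | h | h | h | h | h | h
      · exact h1 (pv_startswith_of_slice line _ hc _ h)
      · exact h2 (pv_startswith_of_slice line _ hc _ h)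
      · exact h3 (pv_startswith_of_slice line _ hc _ h)
      · exact h4 (pv_startswith_of_slice line _ hc _ h)
      · exact h5 (pv_startswith_of_slice line _ hc _ h)
      · exact h6 (pv_startswith_of_slice line _ hc _ h)
      · exact h7 (pv_startswith_of_slice line _ hc _ h)
      · exact h8 (pv_startswith_of_slice line _ hc _ h)
  · simp only [pvMatchB]
    rw [if_neg hc]

-- stage-2 target of the last segment = A's current_multiline_field
def pvLastTarget (segs : List (String × String × List String)) : Option String :=
  match segs.getLast? with
  | some (f, _, _) => PySem.Dict.get? pvMultilineMapA f
  | none => none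

-- one line of the block advances A's state exactly as it advances B's segments
lemma pv_step_seg (segs : List (String × String × List String)) (l : String) :
    pvStepA (segs.foldl pvAggStep pvInitFieldsA, pvLastTarget segs) l
      = ((pvSegStep segs l).foldl pvAggStep pvInitFieldsA, pvLastTarget (pvSegStep segs l)) := by
  have hmm : pvMultilineMapB = pvMultilineMapA := rfl
  unfold pvStepA pvSegStep
  rw [← pv_match_eq]
  cases hm : pvMatchB l with
  | some fv =>
    obtain ⟨f, v⟩ := fv
    simp only [List.foldl_append, List.foldl_cons, List.foldl_nil]
    have hlast : pvLastTarget (segs ++ [(f, v, [])]) = PySem.Dict.get? pvMultilineMapA f := by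
      simp [pvLastTarget]
    rw [hlast]
    have hagg : pvAggStep (segs.foldl pvAggStep pvInitFieldsA) (f, v, []) =
        (segs.foldl pvAggStep pvInitFieldsA).insert f v := by
      unfold pvAggStep
      cases PySem.Dict.get? pvMultilineMapB f <;> rfl
    rw [hagg]
  | none =>
    cases hl : segs.getLast? with
    | none =>
      have hseg0 : segs = [] := List.getLast?_eq_none_iff.mp hl
      subst hseg0
      simp [pvLastTarget]
    | some seg =>
      obtain ⟨f, v, cont⟩ := seg
      obtain ⟨pre, hpre⟩ := List.getLast?_eq_some_iff.mp hl
      subst hpre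
      have hdl : (pre ++ [(f, v, cont)]).dropLast = pre := by
        simp
      rw [hdl]
      have hlt : pvLastTarget (pre ++ [(f, v, cont)]) = PySem.Dict.get? pvMultilineMapA f := by
        simp [pvLastTarget]
      have hlt' : pvLastTarget (pre ++ [(f, v, cont ++ [l])]) = PySem.Dict.get? pvMultilineMapA f := by
        simp [pvLastTarget]
      rw [hlt, hlt']
      simp only [List.foldl_append, List.foldl_cons, List.foldl_nil]
      cases ht : PySem.Dict.get? pvMultilineMapA f with
      | none =>
        unfold pvAggStep
        simp only [hmm, ht]
      | some t =>
        unfold pvAggStep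
        simp only [hmm, ht, List.foldl_append, List.foldl_cons, List.foldl_nil]

-- main invariant: A's fold from the state represented by segs equals B's aggregate of segs
lemma pv_invariant (block : List String) : ∀ (segs : List (String × String × List String)),
    (block.foldl pvStepA (segs.foldl pvAggStep pvInitFieldsA, pvLastTarget segs)).1
      = (block.foldl pvSegStep segs).foldl pvAggStep pvInitFieldsA := by
  induction block with
  | nil => intro segs; rfl
  | cons l rest ih =>
    intro segs
    simp only [List.foldl_cons]
    rw [pv_step_seg segs l]
    exact ih (pvSegStep segs l)

-- ===== VERDICT (by name: the statement is the Claim_ definition above) =====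
theorem most_optimized_approach_spec : Claim_equal_most_optimized_approach := by
  intro block _
  unfold Spec_most_optimized_approach most_optimized_approach most_optimized_approach_alt pvSegments
  have h := pv_invariant block []
  simp only [List.foldl_nil, pvLastTarget, List.getLast?_nil] at h
  have hinit : pvInitFieldsB = pvInitFieldsA := by rfl
  rw [hinit, ← h]
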